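-- pv_equiv track=rewrite | github.com/luiscamposangulo/Riqai_metaads | src/campaigns/get_metrics.py | extraer_resultados
-- ===== SOURCE A (Python) =====
-- def extraer_resultados(actions):
--     """
--     Extrae el número de resultados principales según el objetivo de la campaña.
--     Cubre distintos tipos: formulario de leads, mensajería, etc.
--     """
--     if not actions:
--         return 0, "sin resultados"
--
--     # Orden de prioridad explícito: Meta usa estos como resultado oficial según el objetivo
--     PRIORIDAD = [
--         ("lead", "Leads"),
--         ("onsite_conversion.lead_grouped", "Leads"),
--         ("onsite_conversion.messaging_conversation_started_7d", "Conversaciones iniciadas"),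
--         ("onsite_conversion.total_messaging_connection", "Mensajes"),
--         ("onsite_conversion.messaging_first_reply", "Primeras respuestas"),
--     ]
--
--     acciones_por_tipo = {a.get("action_type"): a.get("value", 0) for a in actions}
--
--     for tipo, etiqueta in PRIORIDAD:
--         if tipo in acciones_por_tipo:
--             return int(acciones_por_tipo[tipo]), etiqueta
--
--     return 0, "sin resultados"
-- ===== SOURCE B (Python) =====
-- def extraer_resultados(actions):
--     """Single forward pass: rank each action by the campaign-objective priority
--     table and keep the best (lowest) rank seen, last occurrence winning on
--     ties; decode the winning rank into its label at the end."""
--     if not actions: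
--         return 0, "sin resultados"
--
--     PRIORIDAD = [
--         ("lead", "Leads"),
--         ("onsite_conversion.lead_grouped", "Leads"),
--         ("onsite_conversion.messaging_conversation_started_7d", "Conversaciones iniciadas"),
--         ("onsite_conversion.total_messaging_connection", "Mensajes"),
--         ("onsite_conversion.messaging_first_reply", "Primeras respuestas"),
--     ]
--     RANK = {tipo: i for i, (tipo, _) in enumerate(PRIORIDAD)}
--
--     best_rank = len(PRIORIDAD)
--     best_value = None
--     for a in actions:
--         r = RANK.get(a.get("action_type"))
--         if r is not None and r <= best_rank:
--             best_rank = r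
--             best_value = a.get("value", 0)
--
--     if best_rank == len(PRIORIDAD):
--         return 0, "sin resultados"
--     return int(best_value), PRIORIDAD[best_rank][1]
-- ===== Notes on version B (the rewrite author's own statement) =====
-- stated objective: alternative
-- what changed: B replaces A's two-stage value-dict-then-priority-loop by a single forward pass over the actions that tracks the best (lowest) priority rank seen with last-occurrence-wins ties, decoding the winning rank into its label at the end.
import Mathlib
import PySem

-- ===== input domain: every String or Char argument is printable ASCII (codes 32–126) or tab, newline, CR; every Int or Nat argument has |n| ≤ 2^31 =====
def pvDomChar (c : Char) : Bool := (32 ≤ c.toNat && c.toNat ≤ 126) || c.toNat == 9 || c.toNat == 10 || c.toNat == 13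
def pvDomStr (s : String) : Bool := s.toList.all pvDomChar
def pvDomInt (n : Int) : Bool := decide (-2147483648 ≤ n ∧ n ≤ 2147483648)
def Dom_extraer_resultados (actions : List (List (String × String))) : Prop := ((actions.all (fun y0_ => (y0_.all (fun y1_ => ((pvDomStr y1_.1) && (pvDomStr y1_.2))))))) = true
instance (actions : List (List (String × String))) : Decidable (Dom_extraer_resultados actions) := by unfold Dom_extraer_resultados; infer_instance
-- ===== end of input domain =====

-- B replaces A's value-dict-then-priority-loop by a single forward pass over the actions
-- that keeps the best (lowest) priority rank seen, last occurrence winning ties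
-- (objective: alternative). Pre_ excludes inputs where some priority-typed action carries
-- a value int() cannot parse (there A raises ValueError, or the unparseable value sits on
-- a shadowed duplicate/tier).


-- shared helpers: the PRIORIDAD constant and the python-dict lookups on one action
def pvPRIORIDAD : List (String × String) :=
  [("lead", "Leads"),
   ("onsite_conversion.lead_grouped", "Leads"),
   ("onsite_conversion.messaging_conversation_started_7d", "Conversaciones iniciadas"),
   ("onsite_conversion.total_messaging_connection", "Mensajes"),
   ("onsite_conversion.messaging_first_reply", "Primeras respuestas")]

-- a.get("action_type") / a.get("value")  (Python dict .get, no default → Option)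
def pvKeyOf (a : List (String × String)) : Option String := (PySem.Dict.mk a).get? "action_type"
def pvValOf (a : List (String × String)) : Option String := (PySem.Dict.mk a).get? "value"

-- int(v) where v is a.get("value", 0): missing → int 0; string → Python int(s) (none = ValueError)
def pvIntOf? (v : Option String) : Option Int :=
  match v with
  | none => some 0
  | some s => PySem.Int.ofStr? s

-- ===== PORT A =====
-- the dict comprehension {a.get("action_type"): a.get("value", 0) for a in actions}
def pvBuild (actions : List (List (String × String))) : PySem.Dict (Option String) (Option String) :=
  actions.foldl (fun d a => d.insert (pvKeyOf a) (pvValOf a)) PySem.Dict.empty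

-- the 'for tipo, etiqueta in PRIORIDAD' loop; none = int() raised ValueError
def pvLoopA (d : PySem.Dict (Option String) (Option String)) : List (String × String) → Option (Int × String)
  | [] => some (0, "sin resultados")
  | (tipo, etiqueta) :: rest =>
    match d.get? (some tipo) with
    | some v => (pvIntOf? v).map (fun n => (n, etiqueta))
    | none => pvLoopA d rest

def extraer_resultados (actions : List (List (String × String))) : Int × String :=
  if actions = [] then (0, "sin resultados")
  else (pvLoopA (pvBuild actions) pvPRIORIDAD).getD (0, "sin resultados")  -- getD only totalizes: Pre_ excludes the ValueError case

-- ===== PORT B =====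
-- RANK = {tipo: i for i, (tipo, _) in enumerate(PRIORIDAD)}
def pvRANK : PySem.Dict String Int :=
  (PySem.List.enumerate pvPRIORIDAD 0).foldl (fun d p => d.insert p.2.1 p.1) PySem.Dict.empty

-- r = RANK.get(a.get("action_type"))  (RANK.get(None) is None: no None key in RANK)
def pvRank (k : Option String) : Option Int :=
  match k with
  | none => none
  | some s => pvRANK.get? s

def pvToInt (v : Option String) : Int :=
  match v with
  | none => 0
  | some s => (PySem.Int.ofStr? s).getD 0  -- getD only totalizes: Pre_ excludes the ValueError case

-- loop body: keep the lowest rank seen so far, last occurrence winning ties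
def pvStep (st : Int × Option (Option String)) (a : List (String × String)) :
    Int × Option (Option String) :=
  match pvRank (pvKeyOf a) with
  | some r => if r ≤ st.1 then (r, some (pvValOf a)) else st
  | none => st

def extraer_resultados_alt (actions : List (List (String × String))) : Int × String :=
  if actions = [] then (0, "sin resultados")
  else
    let st := actions.foldl pvStep (PySem.List.len pvPRIORIDAD, none)
    if st.1 = PySem.List.len pvPRIORIDAD then (0, "sin resultados")
    else ((match st.2 with
           | some v => pvToInt v
           | none => 0),  -- unreachable: best_value is set whenever best_rank dropped below len
          ((PySem.List.pyGet? pvPRIORIDAD st.1).getD ("", "")).2)  -- getD only totalizes: rank is in range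

-- ===== PRECONDITION & SPEC =====
-- Pre_ excludes inputs where some action whose action_type is a priority type carries a
-- value int() cannot parse: on the tier A selects, int() raises ValueError; Pre_ is slightly
-- wider than the raise set (it also rejects unparseable values on shadowed duplicates or
-- lower, never-evaluated tiers, on which A and B both still return the same value).
def Pre_extraer_resultados (actions : List (List (String × String))) : Prop :=
  ∀ a ∈ actions, (∃ t ∈ pvPRIORIDAD, pvKeyOf a = some t.1) → (pvIntOf? (pvValOf a)).isSome = true
instance (actions : List (List (String × String))) : Decidable (Pre_extraer_resultados actions) := by unfold Pre_extraer_resultados; infer_instance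

def pvWitness_extraer_resultados : (List (List (String × String))) :=
  [[("action_type", "lead"), ("value", "3")], [("action_type", "foo"), ("value", "zz")]]

def Spec_extraer_resultados (actions : List (List (String × String))) (out : Int × String) : Prop := out = extraer_resultados_alt actions
instance (actions : List (List (String × String))) (out : Int × String) : Decidable (Spec_extraer_resultados actions out) := by unfold Spec_extraer_resultados; infer_instance

-- ===== CLAIM (what is proved, stated in full; the proofs are below) =====
def Claim_equal_extraer_resultados : Prop := ∀ (actions : List (List (String × String))), Dom_extraer_resultados actions → Pre_extraer_resultados actions → Spec_extraer_resultados actions (extraer_resultados actions)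

-- ===== LEMMAS AND PROOFS =====

-- proof-side characterisation: position of k in the priority list, offset i
def pvIdxIn (k : Option String) (i : Nat) : List (String × String) → Option Nat
  | [] => none
  | (t, _) :: rest => if k = some t then some i else pvIdxIn k (i + 1) rest

-- proof-side characterisation: first tier (≥ i) with a match in r, with the matching action
def pvFB (i : Nat) (r : List (List (String × String))) :
    List (String × String) → Option (Nat × List (String × String))
  | [] => none
  | (t, _) :: rest =>
    match r.find? (fun a => pvKeyOf a == some t) with
    | some a => some (i, a)
    | none => pvFB (i + 1) r rest

theorem pvIdxIn_ge (k : Option String) (P : List (String × String)) :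
    ∀ i j, pvIdxIn k i P = some j → i ≤ j := by
  induction P with
  | nil => intro i j h; simp [pvIdxIn] at h
  | cons p rest ih =>
    intro i j h
    obtain ⟨t, e⟩ := p
    simp only [pvIdxIn] at h
    split_ifs at h with hk
    · simp at h; omega
    · exact Nat.le_of_succ_le (ih (i + 1) j h)

theorem pvIdxIn_lt (k : Option String) (P : List (String × String)) :
    ∀ i j, pvIdxIn k i P = some j → j < i + P.length := by
  induction P with
  | nil => intro i j h; simp [pvIdxIn] at h
  | cons p rest ih =>
    intro i j h
    obtain ⟨t, e⟩ := p
    simp only [pvIdxIn] at h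
    split_ifs at h with hk
    · simp at h; simp; omega
    · have := ih (i + 1) j h; simp; omega

theorem pvFB_ge (r : List (List (String × String))) (P : List (String × String)) :
    ∀ i j a, pvFB i r P = some (j, a) → i ≤ j := by
  induction P with
  | nil => intro i j a h; simp [pvFB] at h
  | cons p rest ih =>
    intro i j a h
    obtain ⟨t, e⟩ := p
    simp only [pvFB] at h
    cases hf : r.find? (fun a => pvKeyOf a == some t) with
    | some b => rw [hf] at h; simp at h; omega
    | none => rw [hf] at h; exact Nat.le_of_succ_le (ih (i + 1) j a h)

theorem pvFB_lt (r : List (List (String × String))) (P : List (String × String)) :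
    ∀ i j a, pvFB i r P = some (j, a) → j < i + P.length := by
  induction P with
  | nil => intro i j a h; simp [pvFB] at h
  | cons p rest ih =>
    intro i j a h
    obtain ⟨t, e⟩ := p
    simp only [pvFB] at h
    cases hf : r.find? (fun a => pvKeyOf a == some t) with
    | some b => rw [hf] at h; simp at h; simp; omega
    | none => rw [hf] at h; have := ih (i + 1) j a h; simp; omega

-- the rank dict RANK looks up to the position in PRIORIDAD
set_option maxRecDepth 20000 in
theorem pvRank_char (k : Option String) : pvRank k = (pvIdxIn k 0 pvPRIORIDAD).map (fun j => (j : Int)) := by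
  cases k with
  | none => decide
  | some s =>
    have hR : pvRANK = PySem.Dict.mk
        [("lead", 0),
         ("onsite_conversion.lead_grouped", 1),
         ("onsite_conversion.messaging_conversation_started_7d", 2),
         ("onsite_conversion.total_messaging_connection", 3),
         ("onsite_conversion.messaging_first_reply", 4)] := by decide
    by_cases h0 : s = "lead"
    · subst h0; decide
    by_cases h1 : s = "onsite_conversion.lead_grouped"
    · subst h1; decide
    by_cases h2 : s = "onsite_conversion.messaging_conversation_started_7d"
    · subst h2; decide
    by_cases h3 : s = "onsite_conversion.total_messaging_connection"
    · subst h3; decide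
    by_cases h4 : s = "onsite_conversion.messaging_first_reply"
    · subst h4; decide
    have e0 : ("lead" == s) = false := beq_eq_false_iff_ne.mpr (Ne.symm h0)
    have e1 : ("onsite_conversion.lead_grouped" == s) = false := beq_eq_false_iff_ne.mpr (Ne.symm h1)
    have e2 : ("onsite_conversion.messaging_conversation_started_7d" == s) = false := beq_eq_false_iff_ne.mpr (Ne.symm h2)
    have e3 : ("onsite_conversion.total_messaging_connection" == s) = false := beq_eq_false_iff_ne.mpr (Ne.symm h3)
    have e4 : ("onsite_conversion.messaging_first_reply" == s) = false := beq_eq_false_iff_ne.mpr (Ne.symm h4)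
    simp only [pvRank, hR, PySem.Dict.get?_mk_cons, e0, e1, e2, e3, e4, if_false,
      pvIdxIn, pvPRIORIDAD, Option.some.injEq]
    simp [PySem.Dict.get?, h0, h1, h2, h3, h4]

-- one more action at the FRONT of the reversed list (i.e. the last action)
theorem pvFB_cons' (a : List (String × String)) (r : List (List (String × String))) :
    ∀ (P : List (String × String)) (i : Nat),
    pvFB i (a :: r) P =
      match pvIdxIn (pvKeyOf a) i P with
      | some j =>
        match pvFB i r P with
        | some (j', b) => if j' < j then some (j', b) else some (j, a)
        | none => some (j, a)
      | none => pvFB i r P := by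
  intro P
  induction P with
  | nil => intro i; simp [pvFB, pvIdxIn]
  | cons p rest ih =>
    intro i
    obtain ⟨t, e⟩ := p
    by_cases hk : pvKeyOf a = some t
    · -- the new action matches this tier: it is found first in a :: r
      simp only [pvFB, pvIdxIn, List.find?_cons, hk, beq_self_eq_true, if_true]
      cases hf : r.find? (fun b => pvKeyOf b == some t) with
      | some b => simp
      | none =>
        cases hFB : pvFB (i + 1) r rest with
        | none => simp
        | some jb =>
          obtain ⟨j', b⟩ := jb
          have hge := pvFB_ge r rest (i + 1) j' b hFB
          have hnlt : ¬ j' < i := by omega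
          simp [hnlt]
    · -- the new action does not match this tier
      have hkb : (pvKeyOf a == some t) = false := by simp [hk]
      simp only [pvFB, pvIdxIn, List.find?_cons, hkb, if_neg hk]
      cases hf : r.find? (fun b => pvKeyOf b == some t) with
      | some b =>
        -- this tier already matched in r: it stays the winner unless a earlier tier (none) –
        cases hI : pvIdxIn (pvKeyOf a) (i + 1) rest with
        | none => simp
        | some j =>
          have := pvIdxIn_ge (pvKeyOf a) rest (i + 1) j hI
          simp [Nat.lt_of_lt_of_le (Nat.lt_succ_self i) this]
      | none => exact ih (i + 1)

-- the single-pass fold computes the best tier with its last matching action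
theorem pvFold_char (xs : List (List (String × String))) :
    xs.foldl pvStep (PySem.List.len pvPRIORIDAD, none) =
      match pvFB 0 xs.reverse pvPRIORIDAD with
      | some (j, a) => ((j : Int), some (pvValOf a))
      | none => (PySem.List.len pvPRIORIDAD, none) := by
  induction xs using List.reverseRecOn with
  | nil => simp [pvFB, pvPRIORIDAD]
  | append_singleton xs a ih =>
    have hlen : PySem.List.len pvPRIORIDAD = 5 := by decide
    rw [List.foldl_append, List.foldl_cons, List.foldl_nil, ih, List.reverse_append]
    simp only [List.reverse_cons, List.reverse_nil, List.nil_append, List.singleton_append]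
    rw [pvFB_cons']
    cases hI : pvIdxIn (pvKeyOf a) 0 pvPRIORIDAD with
    | none =>
      have hr : pvRank (pvKeyOf a) = none := by rw [pvRank_char, hI]; rfl
      cases hFB : pvFB 0 xs.reverse pvPRIORIDAD <;> simp [pvStep, hr]
    | some j =>
      have hr : pvRank (pvKeyOf a) = some (j : Int) := by rw [pvRank_char, hI]; rfl
      have hjlt : j < 5 := by
        have := pvIdxIn_lt (pvKeyOf a) pvPRIORIDAD 0 j hI
        simpa [pvPRIORIDAD] using this
      cases hFB : pvFB 0 xs.reverse pvPRIORIDAD with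
      | none =>
        simp only [pvStep, hr, hlen]
        have hle : (j : Int) ≤ 5 := by omega
        simp [hle]
      | some jb =>
        obtain ⟨j', b⟩ := jb
        simp only [pvStep, hr]
        by_cases hlt : j' < j
        · have : ¬ ((j : Int) ≤ (j' : Int)) := by omega
          simp [this, hlt]
        · have : (j : Int) ≤ (j' : Int) := by omega
          simp [this, hlt]

-- the dict built by the comprehension looks up to the LAST action with that action_type
theorem pvBuild_get (actions : List (List (String × String))) (k : Option String) :
    (pvBuild actions).get? k
      = (actions.reverse.find? (fun a => pvKeyOf a == k)).map pvValOf := by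
  suffices h : ∀ (l : List (List (String × String))) (d : PySem.Dict (Option String) (Option String)),
      (l.foldl (fun d a => d.insert (pvKeyOf a) (pvValOf a)) d).get? k
        = match l.reverse.find? (fun a => pvKeyOf a == k) with
          | some a => some (pvValOf a)
          | none => d.get? k by
    have := h actions PySem.Dict.empty
    unfold pvBuild
    rw [this]
    cases actions.reverse.find? (fun a => pvKeyOf a == k) <;> simp [PySem.Dict.get?_empty]
  intro l
  induction l with
  | nil => intro d; simp
  | cons a t ih =>
    intro d
    simp only [List.foldl_cons, List.reverse_cons, List.find?_append, ih]
    cases hf : t.reverse.find? (fun a => pvKeyOf a == k) with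
    | some b => simp
    | none =>
      simp only [Option.none_or]
      rw [PySem.Dict.get?_insert]
      by_cases hk : pvKeyOf a = k
      · subst hk
        simp
      · have hb : (pvKeyOf a == k) = false := beq_eq_false_iff_ne.mpr hk
        simp [hb, Ne.symm hk]

-- A's priority loop over a suffix of PRIORIDAD, under Pre_, in pvFB form
theorem pvLoopA_char (xs : List (List (String × String)))
    (H : ∀ a ∈ xs, (∃ t ∈ pvPRIORIDAD, pvKeyOf a = some t.1) → (pvIntOf? (pvValOf a)).isSome = true) :
    ∀ (P : List (String × String)) (i : Nat), pvPRIORIDAD.drop i = P →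
    pvLoopA (pvBuild xs) P =
      some (match pvFB i xs.reverse P with
            | some (j, a) => (pvToInt (pvValOf a),
                ((PySem.List.pyGet? pvPRIORIDAD (j : Int)).getD ("", "")).2)
            | none => (0, "sin resultados")) := by
  intro P
  induction P with
  | nil => intro i _; simp [pvLoopA, pvFB]
  | cons p rest ih =>
    intro i hdrop
    obtain ⟨t, e⟩ := p
    have hget := pvBuild_get xs (some t)
    simp only [pvLoopA, pvFB, hget]
    cases hf : xs.reverse.find? (fun a => pvKeyOf a == some t) with
    | none =>
      simp only [Option.map_none]
      refine ih (i + 1) ?_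
      have h1 := congrArg (List.drop 1) hdrop
      simpa [List.drop_drop, Nat.add_comm] using h1
    | some a =>
      have hmem : a ∈ xs := List.mem_reverse.mp (List.mem_of_find?_eq_some hf)
      have hkey : pvKeyOf a = some t := by
        have := List.find?_some hf; simpa using this
      have htP : (t, e) ∈ pvPRIORIDAD :=
        List.mem_of_mem_drop (show (t, e) ∈ pvPRIORIDAD.drop i by rw [hdrop]; simp)
      have hsome : (pvIntOf? (pvValOf a)).isSome = true :=
        H a hmem ⟨(t, e), htP, hkey⟩
      have hi5 : i < pvPRIORIDAD.length := by
        by_contra hge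
        rw [List.drop_eq_nil_of_le (Nat.le_of_not_lt hge)] at hdrop
        exact List.cons_ne_nil _ _ hdrop.symm
      have hgetI : PySem.List.pyGet? pvPRIORIDAD (i : Int) = some (t, e) := by
        rw [PySem.List.pyGet?_natCast]
        have h0 : (pvPRIORIDAD.drop i)[0]? = pvPRIORIDAD[i]? := by
          simp [List.getElem?_drop]
        rw [← h0, hdrop]; rfl
      simp only [Option.map_some, hgetI]
      cases hv : pvValOf a with
      | none => simp [pvIntOf?, pvToInt]
      | some s =>
        rw [hv] at hsome
        simp only [pvIntOf?] at hsome ⊢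
        cases hiv : PySem.Int.ofStr? s with
        | none => rw [hiv] at hsome; simp at hsome
        | some n => simp [pvToInt, hiv]

-- ===== VERDICT (by name: the statement is the Claim_ definition above) =====
theorem extraer_resultados_spec : Claim_equal_extraer_resultados := by
  intro actions _ hpre
  unfold Spec_extraer_resultados extraer_resultados extraer_resultados_alt
  by_cases h : actions = []
  · simp [h]
  · simp only [h, if_false]
    rw [pvLoopA_char actions hpre pvPRIORIDAD 0 rfl, pvFold_char]
    cases hFB : pvFB 0 actions.reverse pvPRIORIDAD with
    | none => simp [pvPRIORIDAD, PySem.List.len]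
    | some jb =>
      obtain ⟨j, a⟩ := jb
      have hjlt : j < 5 := by
        have := pvFB_lt actions.reverse pvPRIORIDAD 0 j a hFB
        simpa [pvPRIORIDAD] using this
      have hne : ¬ (j = pvPRIORIDAD.length) := by simp [pvPRIORIDAD]; omega
      have hne' : ¬ ((j : Int) = PySem.List.len pvPRIORIDAD) := by
        simp [pvPRIORIDAD, PySem.List.len]; omega
      simp [hne]
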